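-- pv_equiv track=rewrite | github.com/saraShnizer/Python-Project | main.py | calculate_payment
-- ===== SOURCE A (Python) =====
-- def calculate_payment(customers):
--     total_payment = 0
--     for index, customer in enumerate(customers, start=1):
--         if index % 8 == 0:
--             total_payment += 200
--         elif index % 8 == 1:
--             total_payment += 250
--     return total_payment
-- ===== SOURCE B (Python) =====
-- def calculate_payment(customers):
--     n = len(customers)
--     return 200 * (n // 8) + 250 * ((n + 7) // 8)
-- ===== Notes on version B (the rewrite author's own statement) =====
-- stated objective: faster
-- what changed: Replaced the O(n) enumerate loop by a closed-form count of 1-based positions congruent to 0 and 1 mod 8 computed from len(customers).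
import Mathlib
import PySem

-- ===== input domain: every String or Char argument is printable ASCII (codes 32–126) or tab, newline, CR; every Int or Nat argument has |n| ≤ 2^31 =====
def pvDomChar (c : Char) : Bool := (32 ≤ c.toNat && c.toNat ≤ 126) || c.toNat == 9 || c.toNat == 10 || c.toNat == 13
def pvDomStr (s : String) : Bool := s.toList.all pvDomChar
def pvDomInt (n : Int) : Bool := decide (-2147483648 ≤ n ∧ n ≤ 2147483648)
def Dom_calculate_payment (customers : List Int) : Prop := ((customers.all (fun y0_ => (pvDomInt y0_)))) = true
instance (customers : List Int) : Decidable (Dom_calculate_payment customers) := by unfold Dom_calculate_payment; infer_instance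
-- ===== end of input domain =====

-- ===== PORT A =====
-- B is a closed-form O(1) formula; A loops over the customers with a 1-based index.
def pvLoopA : List Int → Int → Int → Int
  | [], _, acc => acc
  | _ :: rest, i, acc =>
      pvLoopA rest (i + 1)
        (if i % 8 = 0 then acc + 200 else if i % 8 = 1 then acc + 250 else acc)

def calculate_payment (customers : List Int) : Int :=
  pvLoopA customers 1 0

-- ===== PORT B =====
def calculate_payment_alt (customers : List Int) : Int :=
  let n : Int := customers.length
  200 * PySem.Int.floordiv n 8 + 250 * PySem.Int.floordiv (n + 7) 8

-- ===== PRECONDITION & SPEC =====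
def Spec_calculate_payment (customers : List Int) (out : Int) : Prop := out = calculate_payment_alt customers
instance (customers : List Int) (out : Int) : Decidable (Spec_calculate_payment customers out) := by unfold Spec_calculate_payment; infer_instance

-- ===== CLAIM (what is proved, stated in full; the proofs are below) =====
def Claim_equal_calculate_payment : Prop := ∀ (customers : List Int), Dom_calculate_payment customers → Spec_calculate_payment customers (calculate_payment customers)

-- ===== LEMMAS AND PROOFS =====

-- ===== VERDICT (by name: the statement is the Claim_ definition above) =====
theorem pvLoopA_eq (customers : List Int) : ∀ (i acc : Int), 0 ≤ i →
    pvLoopA customers (i + 1) acc =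
      acc + 200 * ((i + customers.length) / 8 - i / 8)
          + 250 * ((i + customers.length + 7) / 8 - (i + 7) / 8) := by
  induction customers with
  | nil => intro i acc _; simp [pvLoopA]
  | cons c rest ih =>
      intro i acc hi
      show pvLoopA rest (i + 1 + 1) _ = _
      rw [ih (i + 1) _ (by omega)]
      simp only [List.length_cons]
      push_cast
      split_ifs with h1 h2 <;> omega

theorem calculate_payment_spec : Claim_equal_calculate_payment := by
  intro customers _
  unfold Spec_calculate_payment calculate_payment calculate_payment_alt
  have h := pvLoopA_eq customers 0 0 le_rfl
  norm_num at h
  simp only [h, PySem.Int.floordiv_eq_ediv_of_pos (b := 8) (by omega)]
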